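-- pv_equiv track=rewrite | github.com/MForofontov/python_utils | bioinformatics_functions/restriction_functions/restriction_site_finder.py | restriction_site_finder
-- ===== SOURCE A (Python) =====
-- from collections.abc import Sequence
--
-- def restriction_site_finder(
--     sequence: str, sites: Sequence[str]
-- ) -> dict[str, list[int]]:
--     """
--     Locate restriction enzyme recognition sites in a sequence.
--
--     Parameters
--     ----------
--     sequence : str
--         Input sequence.
--     sites : Sequence[str]
--         List of recognition site sequences.
--
--     Returns
--     -------
--     dict[str, list[int]]
--         Dictionary mapping each site to list of positions where it was found.
--
--     Raises
--     ------
--     ValueError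
--         If sites is empty.
--
--     Examples
--     --------
--     >>> restriction_site_finder("ATGCGAATTC", ["GAATTC"])
--     {'GAATTC': [4]}
--
--     Complexity
--     ----------
--     Time: O(n*m), Space: O(k)
--     """
--     if not sites:
--         raise ValueError("sites cannot be empty")
--
--     # Convert sequence and sites to uppercase for case-insensitive matching
--     sequence_upper = sequence.upper()
--
--     results: dict[str, list[int]] = {}
--     for site in sites:
--         site_upper = site.upper()
--         positions: list[int] = []
--         start = 0
--         while True:
--             idx = sequence_upper.find(site_upper, start)
--             if idx == -1:
--                 break
--             positions.append(idx)
--             start = idx + 1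
--         results[site_upper] = positions
--
--     return results
-- ===== SOURCE B (Python) =====
-- def restriction_site_finder(sequence, sites):
--     """Hash-index re-implementation: one sweep over window start positions; at each
--     position the window of each distinct site length is looked up in a dict of the
--     (uppercased) sites, so no per-site scan of the sequence is needed."""
--     if not sites:
--         raise ValueError("sites cannot be empty")
--     seq = sequence.upper()
--     n = len(seq)
--     results = {}
--     for site in sites:
--         results[site.upper()] = []
--     lengths = []
--     for s in results:
--         if len(s) not in lengths:
--             lengths.append(len(s))
--     for i in range(n + 1):
--         for m in lengths:
--             if i + m <= n:
--                 positions = results.get(seq[i:i + m])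
--                 if positions is not None:
--                     positions.append(i)
--     return results
-- ===== Notes on version B (the rewrite author's own statement) =====
-- stated objective: faster
-- what changed: Site-major repeated str.find scanning is replaced by a single position-major sweep: at each start position the window of each distinct site length is looked up in a dict of the (uppercased) sites, so the per-site scan of the sequence disappears.
-- outside the precondition, e.g. on restriction_site_finder('ATGC', []): A raises ValueError, B raises ValueError
import Mathlib
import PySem

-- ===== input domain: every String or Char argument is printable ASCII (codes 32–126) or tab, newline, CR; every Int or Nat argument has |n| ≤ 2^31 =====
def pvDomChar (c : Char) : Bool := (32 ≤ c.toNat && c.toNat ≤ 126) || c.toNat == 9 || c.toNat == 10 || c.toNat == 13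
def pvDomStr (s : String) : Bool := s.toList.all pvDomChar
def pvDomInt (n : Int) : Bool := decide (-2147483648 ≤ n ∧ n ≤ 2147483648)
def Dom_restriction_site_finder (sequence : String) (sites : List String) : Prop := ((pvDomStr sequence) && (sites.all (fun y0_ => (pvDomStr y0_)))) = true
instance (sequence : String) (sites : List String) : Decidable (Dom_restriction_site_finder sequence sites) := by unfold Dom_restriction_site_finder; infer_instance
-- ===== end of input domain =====

-- B replaces A's site-major repeated str.find scan by one position-major sweep that looks the
-- window of each distinct site length up in a dict of the sites, removing the per-site scan.

-- ===== PORT A =====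
-- A's inner while-loop: repeated sequence_upper.find(site_upper, start).  Each found index is
-- ≥ start, and find with a start past the end returns -1, so the loop terminates; the dite
-- guard below only makes that exit explicit for termination — in the guarded region findFrom
-- is exactly Python's find, and outside it (start > len) Python's find returns -1 and breaks.
def pvFindAll (seq site : List Char) (start : Nat) : List Int :=
  if hle : start ≤ seq.length then
    if hidx : PySem.Chars.findFrom seq site (start : Int) none = -1 then []
    else (PySem.Chars.findFrom seq site (start : Int) none) ::
      pvFindAll seq site ((PySem.Chars.findFrom seq site (start : Int) none).toNat + 1)
  else []
termination_by seq.length + 1 - start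
decreasing_by
  have h := (PySem.Chars.findFrom_natCast_spec seq site start hle hidx).1
  omega

def restriction_site_finder (sequence : String) (sites : List String) : List (String × List Int) :=
  -- 'if not sites: raise ValueError' → Pre_restriction_site_finder
  let sequence_upper := PySem.Str.upper sequence
  (sites.foldl
    (fun (results : PySem.Dict String (List Int)) site =>
      results.insert (PySem.Str.upper site)
        (pvFindAll sequence_upper.toList (PySem.Str.upper site).toList 0))
    PySem.Dict.empty).items

-- ===== PORT B =====
-- helper used by port B: one dict update of the position-sweep (window of length m at i)
def pvInner (seq : String) (n i : Int) (d : PySem.Dict String (List Int)) (m : Int) :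
    PySem.Dict String (List Int) :=
  if i + m ≤ n then
    if d.contains (PySem.Str.slice seq (some i) (some (i + m)))
    then d.modify (PySem.Str.slice seq (some i) (some (i + m))) [] (fun ps => ps ++ [i])
    else d
  else d


def restriction_site_finder_alt (sequence : String) (sites : List String) : List (String × List Int) :=
  -- 'if not sites: raise ValueError' → Pre_restriction_site_finder
  let seq := PySem.Str.upper sequence
  let n := PySem.Str.len seq
  let results := sites.foldl
      (fun (d : PySem.Dict String (List Int)) site => d.insert (PySem.Str.upper site) [])
      PySem.Dict.empty
  let lengths := results.keys.foldl (fun L s => PySem.Set.add L (PySem.Str.len s)) []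
  ((PySem.List.pyRange 0 (n + 1) 1).foldl
      (fun d i => lengths.foldl (pvInner seq n i) d) results).items

-- ===== PRECONDITION & SPEC =====
-- A raises ValueError exactly when sites is empty; Pre_ excludes only that input.
def Pre_restriction_site_finder (sequence : String) (sites : List String) : Prop := sites ≠ []
instance (sequence : String) (sites : List String) : Decidable (Pre_restriction_site_finder sequence sites) := by unfold Pre_restriction_site_finder; infer_instance
def pvWitness_restriction_site_finder : String × List String := ("ATGCGAATTC", ["GAATTC", "atg", ""])

def Spec_restriction_site_finder (sequence : String) (sites : List String) (out : List (String × List Int)) : Prop := out = restriction_site_finder_alt sequence sites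
instance (sequence : String) (sites : List String) (out : List (String × List Int)) : Decidable (Spec_restriction_site_finder sequence sites out) := by unfold Spec_restriction_site_finder; infer_instance

-- ===== CLAIM (what is proved, stated in full; the proofs are below) =====
def Claim_equal_restriction_site_finder : Prop := ∀ (sequence : String) (sites : List String), Dom_restriction_site_finder sequence sites → Pre_restriction_site_finder sequence sites → Spec_restriction_site_finder sequence sites (restriction_site_finder sequence sites)

-- ===== LEMMAS AND PROOFS =====

-- Inserting key x with a value that depends only on the key into a key-determined dict.
theorem insert_keyfn {ν : Type} (f : String → ν) (ks : List String) (x : String) :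
    PySem.Dict.insert (PySem.Dict.mk (ks.map (fun k => (k, f k)))) x (f x)
      = PySem.Dict.mk ((PySem.Set.add ks x).map (fun k => (k, f k))) := by
  apply PySem.Dict.ext
  rw [PySem.Dict.items_insert]
  simp only [PySem.Dict.contains_mk, List.any_map, PySem.Set.add, PySem.Set.contains]
  by_cases h : x ∈ ks
  · simp [h, List.any_eq_true, Function.comp]
    intro a _ ha; subst ha; exact ⟨rfl, rfl⟩
  · simp [h, List.any_eq_true, Function.comp]

-- A fold of inserts whose value depends only on the key, started from a key-determined dict,
-- has as items exactly the Set-extension of the starting keys, each paired with its value.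
theorem items_foldl_insert_keyfn {ν : Type} (f : String → ν) :
    ∀ (l : List String) (ks : List String),
      (l.foldl (fun d k => PySem.Dict.insert d k (f k))
        (PySem.Dict.mk (ks.map (fun k => (k, f k))))).items
        = (l.foldl PySem.Set.add ks).map (fun k => (k, f k)) := by
  intro l
  induction l with
  | nil => intro ks; rfl
  | cons x l ih =>
    intro ks
    simp only [List.foldl_cons, insert_keyfn f ks x]
    exact ih (PySem.Set.add ks x)

-- Specialisation to the empty starting dict of both ports.
theorem items_foldl_insert_keyfn_empty {ν : Type} (f : String → ν) (l : List String) :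
    (l.foldl (fun d k => PySem.Dict.insert d k (f k)) PySem.Dict.empty).items
      = (PySem.Set.ofList l).map (fun k => (k, f k)) := by
  rw [show (PySem.Dict.empty : PySem.Dict String ν)
      = PySem.Dict.mk (([] : List String).map (fun k => (k, f k))) from rfl]
  rw [items_foldl_insert_keyfn f l [], PySem.Set.ofList_eq_foldl]

-- One step of A's find-loop, phrased on the filtered range.
theorem filter_range_step (N a b : Nat) (p : Nat → Bool) (hb : b < N) (hpb : p b = true)
    (hab : a ≤ b) (hmin : ∀ i, a ≤ i → i < b → p i = false) :
    (List.range N).filter (fun j => decide (a ≤ j) && p j)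
      = b :: (List.range N).filter (fun j => decide (b + 1 ≤ j) && p j) := by
  induction N with
  | zero => omega
  | succ N ih =>
    by_cases hbN : b < N
    · rw [List.range_succ, List.filter_append, List.filter_append, ih hbN]
      have : (decide (a ≤ N) && p N) = (decide (b + 1 ≤ N) && p N) := by
        have h1 : a ≤ N := by omega
        have h2 : b + 1 ≤ N := by omega
        simp [h1, h2]
      simp [List.filter, this]
    · have hbe : b = N := by omega
      subst hbe
      rw [List.range_succ, List.filter_append, List.filter_append]
      have h1 : (List.range b).filter (fun j => decide (a ≤ j) && p j) = [] := by
        apply List.filter_eq_nil_iff.2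
        intro j hj
        have hj' : j < b := List.mem_range.1 hj
        by_cases ha : a ≤ j
        · simp [hmin j ha hj']
        · simp [ha]
      have h2 : (List.range b).filter (fun j => decide (b + 1 ≤ j) && p j) = [] := by
        apply List.filter_eq_nil_iff.2
        intro j hj
        have hj' : j < b := List.mem_range.1 hj
        have : ¬ (b + 1 ≤ j) := by omega
        simp [this]
      rw [h1, h2]
      have : ¬ (b + 1 ≤ b) := by omega
      simp [List.filter, hab, hpb, this]

-- If no occurrence of t starts at or after position start, none starts at any j ≥ start.
theorem no_match_of_not_infix (s t : List Char) (start j : Nat) (hsj : start ≤ j)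
    (hni : ¬ t <:+: s.drop start) : ¬ t <+: s.drop j := by
  intro hp
  apply hni
  refine List.infix_iff_prefix_suffix.2 ⟨s.drop j, hp, ?_⟩
  have : (s.drop start).drop (j - start) = s.drop j := by
    rw [List.drop_drop]; congr 1; omega
  rw [← this]; exact List.drop_suffix _ _

-- A's find-loop collects exactly the match positions ≥ start (fuelled strong induction).
theorem pvFindAll_eq_filter_aux (s t : List Char) :
    ∀ (m start : Nat), s.length + 1 - start ≤ m → start ≤ s.length + 1 →
      pvFindAll s t start
        = ((List.range (s.length + 1)).filter
            (fun j => decide (start ≤ j) && decide (t <+: s.drop j))).map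
          (fun (j : Nat) => (j : Int)) := by
  intro m
  induction m with
  | zero =>
    intro start hm hs
    rw [pvFindAll]
    have hle : ¬ start ≤ s.length := by omega
    rw [dif_neg hle]
    have : (List.range (s.length + 1)).filter
        (fun j => decide (start ≤ j) && decide (t <+: s.drop j)) = [] := by
      apply List.filter_eq_nil_iff.2
      intro j hj
      have : j < s.length + 1 := List.mem_range.1 hj
      have : ¬ start ≤ j := by omega
      simp [this]
    rw [this]; rfl
  | succ m ih =>
    intro start hm hs
    by_cases hle : start ≤ s.length
    · rw [pvFindAll, dif_pos hle]
      by_cases hidx : PySem.Chars.findFrom s t (start : Int) none = -1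
      · rw [dif_pos hidx]
        have hni : ¬ t <:+: s.drop start :=
          (PySem.Chars.findFrom_natCast_eq_neg_one_iff s t start hle).1 hidx
        have : (List.range (s.length + 1)).filter
            (fun j => decide (start ≤ j) && decide (t <+: s.drop j)) = [] := by
          apply List.filter_eq_nil_iff.2
          intro j _
          by_cases hsj : start ≤ j
          · simp [no_match_of_not_infix s t start j hsj hni]
          · simp [hsj]
        rw [this]; rfl
      · rw [dif_neg hidx]
        obtain ⟨h1, h2, h3⟩ := PySem.Chars.findFrom_natCast_spec s t start hle hidx
        set idx := PySem.Chars.findFrom s t (start : Int) none with hidxdef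
        have hnn : (0 : Int) ≤ idx := le_trans (by exact_mod_cast Nat.zero_le start) h1
        have hbs : start ≤ idx.toNat := by omega
        have hbl : idx.toNat ≤ s.length := by
          by_cases ht : t = []
          · subst ht
            have := PySem.Chars.findFrom_natCast s [] start hle
            rw [PySem.Chars.find_nil] at this
            simp at this
            rw [hidxdef, this]
            omega
          · have hne : s.drop idx.toNat ≠ [] := by
              intro hnil
              rw [hnil] at h2
              exact ht (List.prefix_nil.1 h2)
            have := List.drop_eq_nil_iff.not.1 (by simpa using hne)
            omega
        have hcast : idx = ((idx.toNat : Nat) : Int) := (Int.toNat_of_nonneg hnn).symm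
        rw [filter_range_step (s.length + 1) start idx.toNat
              (fun j => decide (t <+: s.drop j)) (by omega) (by simp [h2]) hbs
              (fun i hi1 hi2 => by simp [h3 i hi1 hi2])]
        rw [List.map_cons]
        rw [ih (idx.toNat + 1) (by omega) (by omega)]
        rw [hcast]
        simp
    · rw [pvFindAll, dif_neg hle]
      have : (List.range (s.length + 1)).filter
          (fun j => decide (start ≤ j) && decide (t <+: s.drop j)) = [] := by
        apply List.filter_eq_nil_iff.2
        intro j hj
        have : j < s.length + 1 := List.mem_range.1 hj
        have : ¬ start ≤ j := by omega
        simp [this]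
      rw [this]; rfl

-- B's per-position slice test is the prefix test.
theorem slice_test_eq (seq : String) (k : String) (j : Nat) :
    (PySem.Str.slice seq (some (j : Int)) (some ((j : Int) + PySem.Str.len k)) = k)
      ↔ k.toList <+: seq.toList.drop j := by
  rw [← String.toList_inj, PySem.Str.toList_slice, PySem.Chars.slice_eq_listSlice,
      PySem.Str.len_eq, PySem.List.slice_natCast_add, List.prefix_iff_eq_take, eq_comm]

theorem pvInner_keys (seq : String) (n i : Int) (d : PySem.Dict String (List Int)) (m : Int) :
    (pvInner seq n i d m).keys = d.keys := by
  unfold pvInner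
  split_ifs with h1 h2
  · rw [PySem.Dict.keys_modify, PySem.Dict.keys_insert_of_contains]
    exact h2
  · rfl
  · rfl

theorem pvInnerFold_keys (seq : String) (n i : Int) :
    ∀ (ls : List Int) (d : PySem.Dict String (List Int)),
      (ls.foldl (pvInner seq n i) d).keys = d.keys := by
  intro ls
  induction ls with
  | nil => intro d; rfl
  | cons m ls ih => intro d; rw [List.foldl_cons, ih, pvInner_keys]

theorem pvInnerFold_contains (seq : String) (n i : Int) (ls : List Int)
    (d : PySem.Dict String (List Int)) (k : String) :
    (ls.foldl (pvInner seq n i) d).contains k = d.contains k := by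
  rw [PySem.Dict.contains_eq_decide_mem_keys, PySem.Dict.contains_eq_decide_mem_keys,
      pvInnerFold_keys]


theorem slice_len_eq (seq k : String) (i m : Int) (hi : 0 ≤ i) (hm : 0 ≤ m)
    (hg : i + m ≤ PySem.Str.len seq)
    (hs : PySem.Str.slice seq (some i) (some (i + m)) = k) : m = PySem.Str.len k := by
  have h1 : (PySem.Str.slice seq (some i) (some (i + m))).toList = k.toList := by rw [hs]
  rw [PySem.Str.toList_slice, PySem.Chars.slice_eq_listSlice,
      PySem.List.slice_toNat seq.toList hi (by omega)] at h1
  have h2 := congrArg List.length h1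
  rw [PySem.Str.len_eq] at hg ⊢
  simp only [List.length_take, List.length_drop] at h2
  omega

theorem pvInnerFold_getD (seq k : String) (i : Int) (hi : 0 ≤ i) :
    ∀ (ls : List Int) (d : PySem.Dict String (List Int)), ls.Nodup →
      (∀ m ∈ ls, 0 ≤ m) → d.contains k = true →
      (ls.foldl (pvInner seq (PySem.Str.len seq) i) d).getD k []
        = d.getD k [] ++
          (if PySem.Str.len k ∈ ls ∧ i + PySem.Str.len k ≤ PySem.Str.len seq ∧
              PySem.Str.slice seq (some i) (some (i + PySem.Str.len k)) = k
           then [i] else []) := by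
  intro ls
  induction ls with
  | nil => intro d _ _ _; simp
  | cons m ls ih =>
    intro d hnd hm0 hc
    have hmnn : 0 ≤ m := hm0 m (List.mem_cons_self ..)
    have hnd' : ls.Nodup := hnd.of_cons
    have hmnot : m ∉ ls := (List.nodup_cons.1 hnd).1
    have hm0' : ∀ m ∈ ls, 0 ≤ m := fun m hm => hm0 m (List.mem_cons_of_mem _ hm)
    rw [List.foldl_cons]
    by_cases hg : i + m ≤ PySem.Str.len seq
    · by_cases hsl : PySem.Str.slice seq (some i) (some (i + m)) = k
      · -- the window at i of length m is exactly k, so m = len k and k's list gains i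
        have hmk : m = PySem.Str.len k := slice_len_eq seq k i m hi hmnn hg hsl
        have hstep : pvInner seq (PySem.Str.len seq) i d m
            = d.modify k [] (fun ps => ps ++ [i]) := by
          unfold pvInner
          rw [if_pos hg, hsl, if_pos hc]
        rw [hstep, ih _ hnd' hm0' (by rw [PySem.Dict.contains_modify]; simp)]
        rw [PySem.Dict.getD_modify_self]
        have hcond : ¬ (PySem.Str.len k ∈ ls ∧ i + PySem.Str.len k ≤ PySem.Str.len seq ∧
            PySem.Str.slice seq (some i) (some (i + PySem.Str.len k)) = k) := by
          intro h; exact hmnot (hmk ▸ h.1)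
        have hpos : PySem.Str.len k ∈ m :: ls ∧ i + PySem.Str.len k ≤ PySem.Str.len seq ∧
            PySem.Str.slice seq (some i) (some (i + PySem.Str.len k)) = k :=
          ⟨by rw [← hmk]; exact List.mem_cons_self .., by omega, by rw [← hmk]; exact hsl⟩
        rw [if_neg hcond, if_pos hpos]
        simp
      · -- window differs from k: k's value is untouched by this step
        have hne : (pvInner seq (PySem.Str.len seq) i d m).getD k [] = d.getD k [] := by
          unfold pvInner
          rw [if_pos hg]
          split_ifs with h2
          · exact PySem.Dict.getD_modify_of_ne d [] _ (fun he => hsl (he ▸ rfl))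
          · rfl
        have hcp : (pvInner seq (PySem.Str.len seq) i d m).contains k = true := by
          unfold pvInner; rw [if_pos hg]
          split_ifs with h2
          · rw [PySem.Dict.contains_modify]; simp [hc]
          · exact hc
        rw [ih _ hnd' hm0' hcp, hne]
        have hiff : (PySem.Str.len k ∈ m :: ls ∧ i + PySem.Str.len k ≤ PySem.Str.len seq ∧
              PySem.Str.slice seq (some i) (some (i + PySem.Str.len k)) = k)
            ↔ (PySem.Str.len k ∈ ls ∧ i + PySem.Str.len k ≤ PySem.Str.len seq ∧
              PySem.Str.slice seq (some i) (some (i + PySem.Str.len k)) = k) := by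
          constructor
          · rintro ⟨h1, h2, h3⟩
            rcases List.mem_cons.1 h1 with he | hmem
            · rw [← he] at hsl; exact absurd h3 hsl
            · exact ⟨hmem, h2, h3⟩
          · rintro ⟨h1, h2, h3⟩; exact ⟨List.mem_cons_of_mem _ h1, h2, h3⟩
        simp only [hiff]
    · -- window would run past the end: nothing happens at this length
      have hstep : pvInner seq (PySem.Str.len seq) i d m = d := by
        unfold pvInner; rw [if_neg hg]
      rw [hstep, ih _ hnd' hm0' hc]
      have hiff : (PySem.Str.len k ∈ m :: ls ∧ i + PySem.Str.len k ≤ PySem.Str.len seq ∧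
            PySem.Str.slice seq (some i) (some (i + PySem.Str.len k)) = k)
          ↔ (PySem.Str.len k ∈ ls ∧ i + PySem.Str.len k ≤ PySem.Str.len seq ∧
            PySem.Str.slice seq (some i) (some (i + PySem.Str.len k)) = k) := by
        constructor
        · rintro ⟨h1, h2, h3⟩
          rcases List.mem_cons.1 h1 with he | hmem
          · rw [← he] at hg; exact absurd h2 hg
          · exact ⟨hmem, h2, h3⟩
        · rintro ⟨h1, h2, h3⟩; exact ⟨List.mem_cons_of_mem _ h1, h2, h3⟩
      simp only [hiff]

theorem pvOuterFold_keys (seq : String) (n : Int) (lengths : List Int) :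
    ∀ (l : List Int) (d : PySem.Dict String (List Int)),
      (l.foldl (fun d i => lengths.foldl (pvInner seq n i) d) d).keys = d.keys := by
  intro l
  induction l with
  | nil => intro d; rfl
  | cons i l ih => intro d; rw [List.foldl_cons, ih, pvInnerFold_keys]

theorem pvOuterFold_getD (seq k : String) (lengths : List Int) (hnd : lengths.Nodup)
    (hm0 : ∀ m ∈ lengths, 0 ≤ m) :
    ∀ (l : List Int) (d : PySem.Dict String (List Int)), (∀ i ∈ l, 0 ≤ i) →
      d.contains k = true →
      (l.foldl (fun d i => lengths.foldl (pvInner seq (PySem.Str.len seq) i) d) d).getD k []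
        = d.getD k [] ++ l.filter (fun i =>
            decide (PySem.Str.len k ∈ lengths ∧ i + PySem.Str.len k ≤ PySem.Str.len seq ∧
              PySem.Str.slice seq (some i) (some (i + PySem.Str.len k)) = k)) := by
  intro l
  induction l with
  | nil => intro d _ _; simp
  | cons i l ih =>
    intro d hl hc
    have hi : 0 ≤ i := hl i (List.mem_cons_self ..)
    have hl' : ∀ i ∈ l, 0 ≤ i := fun i hi => hl i (List.mem_cons_of_mem _ hi)
    have hcp : (lengths.foldl (pvInner seq (PySem.Str.len seq) i) d).contains k = true := by
      rw [pvInnerFold_contains]; exact hc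
    rw [List.foldl_cons, ih _ hl' hcp, pvInnerFold_getD seq k i hi lengths d hnd hm0 hc]
    by_cases hP : PySem.Str.len k ∈ lengths ∧ i + PySem.Str.len k ≤ PySem.Str.len seq ∧
        PySem.Str.slice seq (some i) (some (i + PySem.Str.len k)) = k
    · rw [if_pos hP, List.filter_cons]
      simp only [decide_eq_true_eq, if_pos hP]
      rw [List.append_assoc, List.singleton_append]
    · rw [if_neg hP, List.filter_cons]
      simp only [decide_eq_true_eq, if_neg hP]
      simp

-- Per key k of B's dict (so len k occurs among the distinct lengths), A's find-loop
-- equals B's sweep contribution for k.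
theorem key_value_eq (sequence : String) (sites : List String) (k : String)
    (hk : k ∈ PySem.Set.ofList (sites.map PySem.Str.upper)) :
    pvFindAll (PySem.Str.upper sequence).toList k.toList 0
      = (PySem.List.pyRange 0 (PySem.Str.len (PySem.Str.upper sequence) + 1) 1).filter
          (fun i => decide (PySem.Str.len k ∈
              PySem.Set.ofList ((PySem.Set.ofList (sites.map PySem.Str.upper)).map PySem.Str.len) ∧
            i + PySem.Str.len k ≤ PySem.Str.len (PySem.Str.upper sequence) ∧
            PySem.Str.slice (PySem.Str.upper sequence) (some i)
              (some (i + PySem.Str.len k)) = k)) := by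
  have hmemL : PySem.Str.len k ∈
      PySem.Set.ofList ((PySem.Set.ofList (sites.map PySem.Str.upper)).map PySem.Str.len) :=
    (PySem.Set.mem_ofList _ _).2 (List.mem_map_of_mem hk)
  have hr : PySem.List.pyRange 0 (PySem.Str.len (PySem.Str.upper sequence) + 1) 1
      = (List.range ((PySem.Str.upper sequence).toList.length + 1)).map
          (fun (j : Nat) => (j : Int)) := by
    rw [PySem.Str.len_eq]
    rw [show (((PySem.Str.upper sequence).toList.length : Int) + 1)
        = (((PySem.Str.upper sequence).toList.length + 1 : Nat) : Int) by push_cast; ring]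
    exact PySem.List.pyRange_zero_nat _
  rw [hr, List.filter_map,
      pvFindAll_eq_filter_aux (PySem.Str.upper sequence).toList k.toList
        ((PySem.Str.upper sequence).toList.length + 1) 0 (by omega) (by omega)]
  congr 1
  apply List.filter_congr
  intro j hj
  have hjn : j ≤ (PySem.Str.upper sequence).toList.length := by
    have := List.mem_range.1 hj; omega
  simp only [Function.comp_apply, Nat.zero_le, decide_true, Bool.true_and]
  apply decide_eq_decide.2
  constructor
  · intro hpre
    refine ⟨hmemL, ?_, (slice_test_eq (PySem.Str.upper sequence) k j).2 hpre⟩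
    have hlen := hpre.length_le
    rw [List.length_drop] at hlen
    rw [PySem.Str.len_eq, PySem.Str.len_eq]
    omega
  · rintro ⟨-, -, hs⟩
    exact (slice_test_eq (PySem.Str.upper sequence) k j).1 hs

-- ===== VERDICT (by name: the statement is the Claim_ definition above) =====
theorem restriction_site_finder_spec : Claim_equal_restriction_site_finder := by
  intro sequence sites _ _
  unfold Spec_restriction_site_finder restriction_site_finder restriction_site_finder_alt
  show (sites.foldl
      (fun (results : PySem.Dict String (List Int)) site =>
        results.insert (PySem.Str.upper site)
          (pvFindAll (PySem.Str.upper sequence).toList (PySem.Str.upper site).toList 0))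
      PySem.Dict.empty).items
    = ((PySem.List.pyRange 0 (PySem.Str.len (PySem.Str.upper sequence) + 1) 1).foldl
        (fun d i =>
          ((sites.foldl
              (fun (d : PySem.Dict String (List Int)) site => d.insert (PySem.Str.upper site) [])
              PySem.Dict.empty).keys.foldl
            (fun L s => PySem.Set.add L (PySem.Str.len s)) []).foldl
            (pvInner (PySem.Str.upper sequence) (PySem.Str.len (PySem.Str.upper sequence)) i) d)
        (sites.foldl
          (fun (d : PySem.Dict String (List Int)) site => d.insert (PySem.Str.upper site) [])
          PySem.Dict.empty)).items
  rw [← List.foldl_map (f := PySem.Str.upper)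
        (g := fun (d : PySem.Dict String (List Int)) k =>
          d.insert k (pvFindAll (PySem.Str.upper sequence).toList k.toList 0)),
      ← List.foldl_map (f := PySem.Str.upper)
        (g := fun (d : PySem.Dict String (List Int)) k => d.insert k ([] : List Int))]
  rw [items_foldl_insert_keyfn_empty
        (fun k => pvFindAll (PySem.Str.upper sequence).toList k.toList 0)
        (sites.map PySem.Str.upper)]
  set U := PySem.Str.upper sequence with hU
  set K := PySem.Set.ofList (sites.map PySem.Str.upper) with hK
  set results := (sites.map PySem.Str.upper).foldl
      (fun (d : PySem.Dict String (List Int)) k => d.insert k ([] : List Int))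
      PySem.Dict.empty with hres
  have hKnd : K.Nodup := PySem.Set.nodup_ofList _
  have hres_items : results.items = K.map (fun k => (k, ([] : List Int))) := by
    rw [hres, items_foldl_insert_keyfn_empty (fun _ => ([] : List Int)) (sites.map PySem.Str.upper)]
  have hres_keys : results.keys = K := by
    rw [show results.keys = results.items.map (·.1) from rfl, hres_items, List.map_map]
    exact List.map_id'' (congrFun rfl) K
  have hlengths : results.keys.foldl (fun L s => PySem.Set.add L (PySem.Str.len s)) []
      = PySem.Set.ofList (K.map PySem.Str.len) := by
    rw [hres_keys, ← List.foldl_map (f := PySem.Str.len) (g := PySem.Set.add),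
        ← PySem.Set.ofList_eq_foldl]
  rw [hlengths]
  set L := PySem.Set.ofList (K.map PySem.Str.len) with hL
  have hLnd : L.Nodup := PySem.Set.nodup_ofList _
  have hLnn : ∀ m ∈ L, 0 ≤ m := by
    intro m hm
    rcases List.mem_map.1 ((PySem.Set.mem_ofList _ _).1 hm) with ⟨s, -, rfl⟩
    rw [PySem.Str.len_eq]
    exact Int.natCast_nonneg _
  set F := (PySem.List.pyRange 0 (PySem.Str.len U + 1) 1).foldl
      (fun d i => L.foldl (pvInner U (PySem.Str.len U) i) d) results with hF
  have hFkeys : F.keys = K := by rw [hF, pvOuterFold_keys, hres_keys]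
  have hFitems : F.items = K.map (fun k => (k, F.getD k [])) := by
    rw [← hFkeys]
    exact PySem.Dict.items_eq_map_keys F (by rw [hFkeys]; exact hKnd) []
  rw [hFitems]
  apply List.map_congr_left
  intro k hkK
  have hcont : results.contains k = true := by
    rw [PySem.Dict.contains_eq_decide_mem_keys, hres_keys]
    exact decide_eq_true hkK
  have hgetD0 : results.getD k [] = [] := by
    refine PySem.Dict.getD_of_mem_items results ?_ (by rw [hres_keys]; exact hKnd) []
    rw [hres_items]
    exact List.mem_map_of_mem hkK
  have hgetD : F.getD k [] = (PySem.List.pyRange 0 (PySem.Str.len U + 1) 1).filter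
      (fun i => decide (PySem.Str.len k ∈ L ∧ i + PySem.Str.len k ≤ PySem.Str.len U ∧
        PySem.Str.slice U (some i) (some (i + PySem.Str.len k)) = k)) := by
    rw [hF, pvOuterFold_getD U k L hLnd hLnn _ results
          (fun i hi => ((PySem.List.mem_pyRange_one).1 hi).1) hcont, hgetD0, List.nil_append]
  rw [hgetD, hU, hL, hK]
  rw [key_value_eq sequence sites k (by rw [hK] at hkK; exact hkK)]
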